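-- pv_equiv track=rewrite | github.com/10639780/proti | helpers.py | direction_to_xyz
-- ===== SOURCE A (Python) =====
-- def direction_to_xyz(string):
--     """Converts a series of string with directions like ['L', 'R', 'U', 'D'] to lists with xyz positions."""
--
--     pos_x = [0, 1]
--     pos_y = [0, 0]
--     pos_z = [0, 0]
--     # go over every node
--     for s in string:
--
--         # previous direction is determined
--         delta_x = pos_x[-1] - pos_x[-2]
--         delta_y = pos_y[-1] - pos_y[-2]
--         delta_z = pos_z[-1] - pos_z[-2]
--
--         # rotation matrices used to turn into the desired direction
--         if s == 'S':
--             pos_x.append(pos_x[-1] + delta_x)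
--             pos_y.append(pos_y[-1] + delta_y)
--             pos_z.append(pos_z[-1] + delta_z)
--
--         elif s == 'L':
--             pos_x.append(pos_x[-1] - delta_y)
--             pos_y.append(pos_y[-1] + delta_x)
--             pos_z.append(pos_z[-1] + delta_z)
--
--         elif s == 'R':
--             pos_x.append(pos_x[-1] + delta_y)
--             pos_y.append(pos_y[-1] - delta_x)
--             pos_z.append(pos_z[-1] + delta_z)
--
--         elif s == 'U':
--             pos_x.append(pos_x[-1] - delta_z)
--             pos_y.append(pos_y[-1] + delta_y)
--             pos_z.append(pos_z[-1] + delta_x)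
--
--         elif s == 'D':
--             pos_x.append(pos_x[-1] + delta_z)
--             pos_y.append(pos_y[-1] + delta_y)
--             pos_z.append(pos_z[-1] - delta_x)
--
--     return pos_x, pos_y, pos_z
-- ===== SOURCE B (Python) =====
-- def _mat(s):
--     # rotation matrix of a recognized command, else None
--     if s == 'S': return ((1, 0, 0), (0, 1, 0), (0, 0, 1))
--     if s == 'L': return ((0, -1, 0), (1, 0, 0), (0, 0, 1))
--     if s == 'R': return ((0, 1, 0), (-1, 0, 0), (0, 0, 1))
--     if s == 'U': return ((0, 0, -1), (0, 1, 0), (1, 0, 0))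
--     if s == 'D': return ((0, 0, 1), (0, 1, 0), (-1, 0, 0))
--     return None
--
--
-- def _mul(a, b):
--     return tuple(tuple(a[i][0] * b[0][j] + a[i][1] * b[1][j] + a[i][2] * b[2][j]
--                        for j in range(3)) for i in range(3))
--
--
-- def direction_to_xyz(string):
--     """Converts a series of string with directions like ['L', 'R', 'U', 'D'] to lists with xyz positions."""
--     # stage 1: translate the recognized commands into rotation matrices
--     mats = [m for m in map(_mat, string) if m is not None]
--     # stage 2: cumulative orientation after each step (left matrix products)
--     orients = []
--     m = ((1, 0, 0), (0, 1, 0), (0, 0, 1))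
--     for r in mats:
--         m = _mul(r, m)
--         orients.append(m)
--     # stage 3: step direction = orientation applied to the initial heading (1,0,0),
--     # i.e. the first column of the orientation matrix
--     dirs = [(o[0][0], o[1][0], o[2][0]) for o in orients]
--     # stage 4: positions are prefix sums of the directions, seeded like the original
--     xs, ys, zs = [0, 1], [0, 0], [0, 0]
--     x, y, z = 1, 0, 0
--     for dx, dy, dz in dirs:
--         x += dx; y += dy; z += dz
--         xs.append(x); ys.append(y); zs.append(z)
--     return xs, ys, zs
-- ===== Notes on version B (the rewrite author's own statement) =====
-- stated objective: alternative
-- what changed: B is a staged pipeline: it maps recognized commands to 3x3 rotation matrices, builds cumulative orientation matrices by matrix products, reads each step direction off as the matrix's first column, and finally takes prefix sums for the positions, instead of A's single loop that re-derives the direction from the last two entries of the output lists each iteration.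
import Mathlib
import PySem

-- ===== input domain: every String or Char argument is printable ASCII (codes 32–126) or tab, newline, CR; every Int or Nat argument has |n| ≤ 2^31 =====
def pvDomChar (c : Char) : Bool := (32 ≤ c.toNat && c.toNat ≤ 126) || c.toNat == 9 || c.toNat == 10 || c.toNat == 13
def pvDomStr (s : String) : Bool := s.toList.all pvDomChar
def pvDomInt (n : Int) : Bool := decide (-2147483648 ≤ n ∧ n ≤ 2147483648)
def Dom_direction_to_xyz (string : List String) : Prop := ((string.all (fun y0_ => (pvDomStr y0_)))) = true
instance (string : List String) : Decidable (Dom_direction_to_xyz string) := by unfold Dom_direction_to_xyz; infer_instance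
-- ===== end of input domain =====

-- B replaces A's single loop (direction re-derived from the last two list entries) by a staged
-- pipeline: commands → rotation matrices → cumulative matrix products → first columns as step
-- directions → prefix sums as positions (objective: alternative algorithm, same cost).

-- ===== PORT A =====
-- one iteration of A's loop: delta from the last two entries, then branch on the command.
-- pos_x[-1]/pos_x[-2] are always in range (the lists start at length 2 and only grow),
-- so `.getD 0` is never the default and the port is exact.
def stepA (st : List Int × List Int × List Int) (s : String) : List Int × List Int × List Int :=
  let px := st.1; let py := st.2.1; let pz := st.2.2
  let lx := (PySem.List.pyGet? px (-1)).getD 0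
  let ly := (PySem.List.pyGet? py (-1)).getD 0
  let lz := (PySem.List.pyGet? pz (-1)).getD 0
  let dx := lx - (PySem.List.pyGet? px (-2)).getD 0
  let dy := ly - (PySem.List.pyGet? py (-2)).getD 0
  let dz := lz - (PySem.List.pyGet? pz (-2)).getD 0
  if s = "S" then (px ++ [lx + dx], py ++ [ly + dy], pz ++ [lz + dz])
  else if s = "L" then (px ++ [lx - dy], py ++ [ly + dx], pz ++ [lz + dz])
  else if s = "R" then (px ++ [lx + dy], py ++ [ly - dx], pz ++ [lz + dz])
  else if s = "U" then (px ++ [lx - dz], py ++ [ly + dy], pz ++ [lz + dx])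
  else if s = "D" then (px ++ [lx + dz], py ++ [ly + dy], pz ++ [lz - dx])
  else st

def direction_to_xyz (string : List String) : List Int × List Int × List Int :=
  string.foldl stepA ([0, 1], [0, 0], [0, 0])

-- ===== PORT B =====
-- a 3×3 integer matrix as three rows of triples
abbrev M3 : Type := (Int × Int × Int) × (Int × Int × Int) × (Int × Int × Int)

-- _mat: rotation matrix of a recognized command, else none
def matOf (s : String) : Option M3 :=
  if s = "S" then some ((1, 0, 0), (0, 1, 0), (0, 0, 1))
  else if s = "L" then some ((0, -1, 0), (1, 0, 0), (0, 0, 1))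
  else if s = "R" then some ((0, 1, 0), (-1, 0, 0), (0, 0, 1))
  else if s = "U" then some ((0, 0, -1), (0, 1, 0), (1, 0, 0))
  else if s = "D" then some ((0, 0, 1), (0, 1, 0), (-1, 0, 0))
  else none

-- _mul: 3×3 matrix product
def mul3 (a b : M3) : M3 :=
  let row := fun (r : Int × Int × Int) =>
    (r.1 * b.1.1 + r.2.1 * b.2.1.1 + r.2.2 * b.2.2.1,
     r.1 * b.1.2.1 + r.2.1 * b.2.1.2.1 + r.2.2 * b.2.2.2.1,
     r.1 * b.1.2.2 + r.2.1 * b.2.1.2.2 + r.2.2 * b.2.2.2.2)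
  (row a.1, row a.2.1, row a.2.2)

-- stage-2 loop body: accumulate the cumulative product and append it to the list
def orStep (acc : List M3 × M3) (r : M3) : List M3 × M3 :=
  let m := mul3 r acc.2
  (acc.1 ++ [m], m)

-- stage-4 loop body: move by the direction and append each coordinate
def posStep (st : (Int × Int × Int) × List Int × List Int × List Int) (d : Int × Int × Int) :
    (Int × Int × Int) × List Int × List Int × List Int :=
  let x := st.1.1 + d.1; let y := st.1.2.1 + d.2.1; let z := st.1.2.2 + d.2.2
  ((x, y, z), st.2.1 ++ [x], st.2.2.1 ++ [y], st.2.2.2 ++ [z])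

-- stage-3 helper: first column of a matrix
def col1 (m : M3) : Int × Int × Int := (m.1.1, m.2.1.1, m.2.2.1)

def direction_to_xyz_alt (string : List String) : List Int × List Int × List Int :=
  let mats := (string.map matOf).filterMap id
  let orients := (mats.foldl orStep ([], ((1, 0, 0), (0, 1, 0), (0, 0, 1)))).1
  let dirs := orients.map col1
  (dirs.foldl posStep ((1, 0, 0), [0, 1], [0, 0], [0, 0])).2

-- ===== PRECONDITION & SPEC =====
def Spec_direction_to_xyz (string : List String) (out : List Int × List Int × List Int) : Prop := out = direction_to_xyz_alt string
instance (string : List String) (out : List Int × List Int × List Int) : Decidable (Spec_direction_to_xyz string out) := by unfold Spec_direction_to_xyz; infer_instance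

-- ===== CLAIM (what is proved, stated in full; the proofs are below) =====
def Claim_equal_direction_to_xyz : Prop := ∀ (string : List String), Dom_direction_to_xyz string → Spec_direction_to_xyz string (direction_to_xyz string)

-- ===== LEMMAS AND PROOFS =====

theorem pyLast (p : List Int) (a b : Int) :
    (PySem.List.pyGet? (p ++ [a, b]) (-1)).getD 0 = b := by
  simp [PySem.List.pyGet?_neg_one]

theorem pyPen (p : List Int) (a b : Int) :
    (PySem.List.pyGet? (p ++ [a, b]) (-2)).getD 0 = a := by
  rw [PySem.List.pyGet?_neg_ofNat (p ++ [a, b]) 2 (by omega) (by simp)]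
  simp

-- the common reference point of both proofs: a single fold carrying the
-- direction vector and the position state explicitly.
def rotOf (s : String) (d : Int × Int × Int) : Option (Int × Int × Int) :=
  if s = "S" then some d
  else if s = "L" then some (-d.2.1, d.1, d.2.2)
  else if s = "R" then some (d.2.1, -d.1, d.2.2)
  else if s = "U" then some (-d.2.2, d.2.1, d.1)
  else if s = "D" then some (d.2.2, d.2.1, -d.1)
  else none

def stepM (st : (Int × Int × Int) × (Int × Int × Int) × List Int × List Int × List Int)
    (s : String) : (Int × Int × Int) × (Int × Int × Int) × List Int × List Int × List Int :=
  match rotOf s st.1 with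
  | some d => (d, (posStep st.2 d).1, (posStep st.2 d).2)
  | none => st

-- ----- A = model -----
def PosInv (stA : List Int × List Int × List Int)
    (stM : (Int × Int × Int) × (Int × Int × Int) × List Int × List Int × List Int) : Prop :=
  stA = stM.2.2 ∧ ∃ p q r,
    stM.2.2.1 = p ++ [stM.2.1.1 - stM.1.1, stM.2.1.1] ∧
    stM.2.2.2.1 = q ++ [stM.2.1.2.1 - stM.1.2.1, stM.2.1.2.1] ∧
    stM.2.2.2.2 = r ++ [stM.2.1.2.2 - stM.1.2.2, stM.2.1.2.2]

theorem step_inv (s : String) (stA : List Int × List Int × List Int)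
    (stM : (Int × Int × Int) × (Int × Int × Int) × List Int × List Int × List Int)
    (h : PosInv stA stM) : PosInv (stepA stA s) (stepM stM s) := by
  obtain ⟨⟨dx, dy, dz⟩, ⟨x, y, z⟩, xs, ys, zs⟩ := stM
  obtain ⟨hA, p, q, r, hx, hy, hz⟩ := h
  simp only at hx hy hz
  subst hA
  by_cases hS : s = "S" <;> by_cases hL : s = "L" <;> by_cases hR : s = "R" <;>
    by_cases hU : s = "U" <;> by_cases hD : s = "D" <;>
    simp_all [stepA, stepM, rotOf, posStep, PosInv, pyLast, pyPen] <;>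
    first
      | exact ⟨⟨p ++ [x - dx], by simp⟩, ⟨q ++ [y - dy], by simp⟩, ⟨r ++ [z - dz], by simp⟩⟩
      | exact ⟨by ring, ⟨p ++ [x - dx], by simp⟩, ⟨q ++ [y - dy], by simp⟩, ⟨r ++ [z - dz], by simp⟩⟩

theorem fold_inv (string : List String) (stA : List Int × List Int × List Int)
    (stM : (Int × Int × Int) × (Int × Int × Int) × List Int × List Int × List Int)
    (h : PosInv stA stM) : PosInv (string.foldl stepA stA) (string.foldl stepM stM) := by
  induction string generalizing stA stM with
  | nil => exact h
  | cons s rest ih => exact ih _ _ (step_inv s _ _ h)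

-- ----- B = model -----
-- the list part of the stage-2 fold factors through an empty accumulator
theorem orAux_acc (mats : List M3) (l : List M3) (m : M3) :
    (mats.foldl orStep (l, m)).1 = l ++ (mats.foldl orStep ([], m)).1 := by
  induction mats generalizing l m with
  | nil => simp
  | cons r rest ih =>
      simp only [List.foldl_cons, orStep, List.nil_append]
      rw [ih (l ++ [mul3 r m]), ih [mul3 r m]]
      simp

-- first column of a product with a recognized rotation = rotOf applied to the first column
theorem matOf_none (s : String) (d : Int × Int × Int) (h : matOf s = none) : rotOf s d = none := by
  unfold matOf at h
  unfold rotOf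
  split_ifs at h ⊢ <;> simp_all

theorem col1_mul (s : String) (r m : M3) (hm : matOf s = some r) :
    rotOf s (col1 m) = some (col1 (mul3 r m)) := by
  obtain ⟨⟨a, b, c⟩, ⟨d, e, f⟩, ⟨g, h, i⟩⟩ := m
  unfold matOf at hm
  split_ifs at hm with h1 h2 h3 h4 h5 <;>
    (injection hm with hm; subst hm
     simp [rotOf, col1, mul3, h1]
     try simp [*])

theorem b_model (string : List String) (m : M3)
    (ps : (Int × Int × Int) × List Int × List Int × List Int) :
    ((((string.map matOf).filterMap id).foldl orStep ([], m)).1.map col1).foldl posStep ps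
      = (string.foldl stepM (col1 m, ps)).2 := by
  induction string generalizing m ps with
  | nil => simp
  | cons s rest ih =>
      cases hm : matOf s with
      | none =>
          simp only [List.map_cons, List.filterMap_cons, hm, List.foldl_cons, stepM,
            matOf_none s (col1 m) hm]
          exact ih m ps
      | some r =>
          simp only [List.map_cons, List.filterMap_cons, hm, id_eq,
            List.foldl_cons, stepM]
          rw [orAux_acc]
          simp only [List.map_append, List.map_cons, List.map_nil, List.foldl_cons,
            List.nil_append, List.foldl_append, orStep, List.foldl_nil]
          have hrot := col1_mul s r m hm
          rw [hrot]
          simpa using ih (mul3 r m) (posStep ps (col1 (mul3 r m)))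

-- ===== VERDICT (by name: the statement is the Claim_ definition above) =====
theorem direction_to_xyz_spec : Claim_equal_direction_to_xyz := by
  intro string _
  have hA := fold_inv string ([0, 1], [0, 0], [0, 0])
      ((1, 0, 0), (1, 0, 0), [0, 1], [0, 0], [0, 0])
      ⟨rfl, [], [], [], rfl, rfl, rfl⟩
  have hB := b_model string ((1, 0, 0), (0, 1, 0), (0, 0, 1))
      ((1, 0, 0), [0, 1], [0, 0], [0, 0])
  show direction_to_xyz string = direction_to_xyz_alt string
  rw [direction_to_xyz_alt, hB, direction_to_xyz, hA.1]
  rfl
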